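-- pv_equiv track=rewrite | github.com/joaoafs/BuggyDataBase | P1.py | corrigir_palavra
-- ===== SOURCE A (Python) =====
-- def lista_para_string(string):
--     """
--     Função auxiliar (Lista para String)
--
--     :param string: list
--     :return: str
--
--     Recebe uma lista e devolve uma string dos caracteres da lista.
--     Exemplo de uso:
--
--     >>> nome = ("a","m","a","d","e","u")
--     >>> lista_para_string(nome)
--     "amadeu"
--     """
--
--     string_aux = ""
--     for letra in string:
--         string_aux += letra
--     return string_aux
--
-- def corrigir_palavra(string):
--     """
--     Corrigir palavra.
--
--     :param string: str
--     :return: str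
--
--     Esta funcao recebe uma cadeia de carateres que representa uma palavra (potencialmente
--     modificada por um surto de letras) e devolve a cadeia de carateres que corresponde a
--     aplicacao da sequencia de reducoes conforme descrito para obter a palavra corrigida.
--     Exemplo de uso:
--
--     >>> corrigir_palavra("abBAx")
--     "x"
--     >>> corrigir_palavra("cCdatabasacCADde")
--     "database"
--     """
--
--     i = 0
--     aux = []
--     aux2 = []
--     aux.extend(string)
--     aux2.extend(string.upper())
--     if len(string) == 1:
--         return ""
--     while i < len(aux) - 1:
--         if aux2[i] == aux2[i+1] and aux[i] != aux[i+1]: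
--             del aux[i:i+2]
--             del aux2[i:i+2]
--             i = 0
--         else:
--             i += 1
--     return lista_para_string(aux)
-- ===== SOURCE B (Python) =====
-- def corrigir_palavra(string):
--     """Single-pass stack reduction: O(n) instead of A's restart-from-zero rescans."""
--     if len(string) == 1:
--         return ""
--     stack = []
--     for ch in string:
--         if stack and stack[-1].upper() == ch.upper() and stack[-1] != ch:
--             stack.pop()
--         else:
--             stack.append(ch)
--     return "".join(stack)
-- ===== Notes on version B (the rewrite author's own statement) =====
-- stated objective: faster
-- what changed: Replaced the restart-from-index-0 delete-and-rescan loop by a single-pass stack that pops when the top cancels the current character (the explicit len==1 -> '' rule is kept).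
import Mathlib
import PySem

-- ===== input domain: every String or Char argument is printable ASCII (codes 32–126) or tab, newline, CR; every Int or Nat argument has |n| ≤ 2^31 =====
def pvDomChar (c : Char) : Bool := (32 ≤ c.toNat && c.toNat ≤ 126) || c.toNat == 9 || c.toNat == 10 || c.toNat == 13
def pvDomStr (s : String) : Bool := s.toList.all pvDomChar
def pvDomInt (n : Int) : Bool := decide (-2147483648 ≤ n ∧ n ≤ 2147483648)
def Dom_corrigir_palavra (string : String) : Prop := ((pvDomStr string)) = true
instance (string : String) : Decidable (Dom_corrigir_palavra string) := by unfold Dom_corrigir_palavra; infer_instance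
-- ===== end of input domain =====

-- B replaces A's delete-a-pair-and-restart-from-index-0 rescan loop by a single
-- left-to-right stack pass that pops when the top cancels the current character;
-- the explicit len == 1 → "" rule of A is kept as the same explicit check.

-- ===== PORT A =====
-- `del l[i:i+2]`
def pvDel (l : List Char) (i : Nat) : List Char := l.take i ++ l.drop (i + 2)

-- helper `lista_para_string`: string_aux = ""; for letra in string: string_aux += letra
def lista_para_string (l : List Char) : String := l.foldl (fun acc c => acc.push c) ""

-- the `while i < len(aux) - 1` loop of A, state (aux, aux2, i)
def pvLoopA (aux aux2 : List Char) (i : Nat) : List Char :=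
  if i < aux.length - 1 then
    if (aux2.getD i ' ' == aux2.getD (i + 1) ' ') && !(aux.getD i ' ' == aux.getD (i + 1) ' ') then
      pvLoopA (pvDel aux i) (pvDel aux2 i) 0
    else
      pvLoopA aux aux2 (i + 1)
  else aux
termination_by (aux.length, aux.length - i)
decreasing_by
  · left
    simp [pvDel, List.length_take, List.length_drop]
    omega
  · right
    omega

def corrigir_palavra (string : String) : String :=
  if PySem.Str.len string == 1 then ""
  else lista_para_string (pvLoopA string.toList ((PySem.Str.upper string).toList) 0)

-- ===== PORT B =====
-- `stack and stack[-1].upper() == ch.upper() and stack[-1] != ch`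
def pvCancel (t c : Char) : Bool :=
  (PySem.Chars.upperChar t == PySem.Chars.upperChar c) && !(t == c)

-- one iteration of B's for-loop; the stack is kept top-first (stack[-1] = head)
def pvStep (st : List Char) (c : Char) : List Char :=
  match st with
  | t :: rest => if pvCancel t c then rest else c :: t :: rest
  | [] => [c]

def corrigir_palavra_alt (string : String) : String :=
  if PySem.Str.len string == 1 then ""
  else String.ofList (string.toList.foldl pvStep []).reverse

-- ===== PRECONDITION & SPEC =====
def Spec_corrigir_palavra (string : String) (out : String) : Prop := out = corrigir_palavra_alt string
instance (string : String) (out : String) : Decidable (Spec_corrigir_palavra string out) := by unfold Spec_corrigir_palavra; infer_instance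

-- ===== CLAIM (what is proved, stated in full; the proofs are below) =====
def Claim_equal_corrigir_palavra : Prop := ∀ (string : String), Dom_corrigir_palavra string → Spec_corrigir_palavra string (corrigir_palavra string)

-- ===== LEMMAS AND PROOFS =====

-- characters: if two distinct characters cancel, exactly one of them is lowercase
theorem pvCancel_islower_ne {x y : Char} (h : pvCancel x y = true) :
    PySem.Chars.islower x ≠ PySem.Chars.islower y := by
  simp [pvCancel] at h
  obtain ⟨hup, hne⟩ := h
  intro hlow
  apply hne
  rcases hx : PySem.Chars.islower x with _ | _
  · rw [hx] at hlow
    simpa [PySem.Chars.upperChar, hx, hlow.symm] using hup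
  · rw [hx] at hlow
    have bx : 97 ≤ x.toNat ∧ x.toNat ≤ 122 := by
      simpa [PySem.Chars.islower, Char.le_def, UInt32.le_iff_toNat_le] using hx
    have by_ : 97 ≤ y.toNat ∧ y.toNat ≤ 122 := by
      simpa [PySem.Chars.islower, Char.le_def, UInt32.le_iff_toNat_le] using hlow.symm
    have hx' : (PySem.Chars.upperChar x).toNat = x.toNat - 32 := by
      have hv : (x.toNat - 32).isValidChar := by left; omega
      simp [PySem.Chars.upperChar, hx, Char.ofNat, hv]
    have hy' : (PySem.Chars.upperChar y).toNat = y.toNat - 32 := by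
      have hv : (y.toNat - 32).isValidChar := by left; omega
      simp [PySem.Chars.upperChar, hlow.symm, Char.ofNat, hv]
    have hxy : x.toNat = y.toNat := by
      have := congrArg Char.toNat hup
      rw [hx', hy'] at this
      omega
    exact Char.ext (UInt32.toNat_inj.mp hxy)

-- the key confluence fact: a character cancelling on both sides is cancelled by equal characters
theorem pvCancel_sandwich {t a b : Char} (h1 : pvCancel t a = true) (h2 : pvCancel a b = true) :
    t = b := by
  have l1 := pvCancel_islower_ne h1
  have l2 := pvCancel_islower_ne h2
  have hlow : PySem.Chars.islower t = PySem.Chars.islower b := by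
    rcases ha : PySem.Chars.islower a with _ | _ <;>
      rcases ht : PySem.Chars.islower t with _ | _ <;>
      rcases hb : PySem.Chars.islower b with _ | _ <;> simp_all
  simp [pvCancel] at h1 h2
  have hup : PySem.Chars.upperChar t = PySem.Chars.upperChar b := h1.1.trans h2.1
  rcases ht : PySem.Chars.islower t with _ | _
  · rw [ht] at hlow
    simpa [PySem.Chars.upperChar, ht, hlow.symm] using hup
  · rw [ht] at hlow
    have bt : 97 ≤ t.toNat ∧ t.toNat ≤ 122 := by
      simpa [PySem.Chars.islower, Char.le_def, UInt32.le_iff_toNat_le] using ht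
    have bb : 97 ≤ b.toNat ∧ b.toNat ≤ 122 := by
      simpa [PySem.Chars.islower, Char.le_def, UInt32.le_iff_toNat_le] using hlow.symm
    have ht' : (PySem.Chars.upperChar t).toNat = t.toNat - 32 := by
      have hv : (t.toNat - 32).isValidChar := by left; omega
      simp [PySem.Chars.upperChar, ht, Char.ofNat, hv]
    have hb' : (PySem.Chars.upperChar b).toNat = b.toNat - 32 := by
      have hv : (b.toNat - 32).isValidChar := by left; omega
      simp [PySem.Chars.upperChar, hlow.symm, Char.ofNat, hv]
    have htb : t.toNat = b.toNat := by
      have := congrArg Char.toNat hup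
      rw [ht', hb'] at this
      omega
    exact Char.ext (UInt32.toNat_inj.mp htb)

-- the stack invariant: no two adjacent stack entries cancel (content order = reverse of the list)
def pvInv (st : List Char) : Prop := List.IsChain (fun x y => pvCancel y x = false) st

theorem pvInv_step {st : List Char} (h : pvInv st) (c : Char) : pvInv (pvStep st c) := by
  match st with
  | [] => simp [pvStep, pvInv]
  | t :: rest =>
    simp only [pvStep]
    by_cases hc : pvCancel t c = true
    · rw [if_pos hc]
      exact h.tail
    · rw [if_neg hc]
      rw [pvInv, List.isChain_cons_cons]
      exact ⟨by simpa using hc, h⟩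

theorem pvInv_foldl {st : List Char} (h : pvInv st) (l : List Char) :
    pvInv (List.foldl pvStep st l) := by
  induction l generalizing st with
  | nil => exact h
  | cons c l ih => exact ih (pvInv_step h c)

-- cancelling pairs may be deleted without changing the stack result
theorem foldl_step_cancel {st : List Char} (h : pvInv st) {a b : Char}
    (hab : pvCancel a b = true) (ys : List Char) :
    List.foldl pvStep st (a :: b :: ys) = List.foldl pvStep st ys := by
  match st with
  | [] =>
    simp only [List.foldl_cons, pvStep, hab]
    rfl
  | t :: rest =>
    by_cases hta : pvCancel t a = true
    · have htb : t = b := pvCancel_sandwich hta hab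
      subst htb
      match rest with
      | [] => simp [List.foldl_cons, pvStep, hta]
      | n :: rest' =>
        have hnt : pvCancel n t = false := by
          have h' := h
          rw [pvInv, List.isChain_cons_cons] at h'
          exact h'.1
        simp [List.foldl_cons, pvStep, hta, hnt]
    · have hta' : pvCancel t a = false := by simpa using hta
      simp [List.foldl_cons, pvStep, hta', hab]

-- a fully reduced word passes through the stack unchanged
theorem foldl_step_reduced (l : List Char) :
    List.IsChain (fun a b => pvCancel a b = false) l →
    ∀ st : List Char, (∀ t c, st.head? = some t → l.head? = some c → pvCancel t c = false) →
    List.foldl pvStep st l = l.reverse ++ st := by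
  induction l with
  | nil =>
    intro _ st _
    simp
  | cons c l ih =>
    intro hred st hcompat
    have hstep : pvStep st c = c :: st := by
      match st with
      | [] => rfl
      | t :: rest =>
        have hf := hcompat t c rfl rfl
        simp [pvStep, hf]
    rw [List.foldl_cons, hstep, ih hred.tail]
    · simp
    · intro t c' ht hc'
      simp only [List.head?_cons, Option.some.injEq] at ht
      subst ht
      match l, hc' with
      | c' :: l', rfl =>
        rw [List.isChain_cons_cons] at hred
        simpa using hred.1

-- decomposition of a list around positions i, i+1
theorem list_decomp {l : List Char} {i : Nat} (h : i + 1 < l.length) :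
    l = l.take i ++ l[i]'(by omega) :: l[i + 1] :: l.drop (i + 2) := by
  conv_lhs => rw [← List.take_append_drop i l]
  rw [List.drop_eq_getElem_cons (show i < l.length by omega), List.drop_eq_getElem_cons h]

-- prefix-scanned condition of A's loop: no cancelling pair among positions j, j+1 with j+1 ≤ i
def pvPF (l : List Char) (i : Nat) : Prop :=
  ∀ j, j + 1 ≤ i → j + 1 < l.length → pvCancel (l.getD j ' ') (l.getD (j + 1) ' ') = false

-- deleting a cancelling pair does not change the stack reduction
theorem foldl_step_del (aux : List Char) (i : Nat) (hi1 : i + 1 < aux.length)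
    (hcan : pvCancel (aux[i]'(by omega)) (aux[i + 1]'hi1) = true) :
    List.foldl pvStep [] aux = List.foldl pvStep [] (pvDel aux i) := by
  conv_lhs => rw [list_decomp hi1]
  rw [List.foldl_append, foldl_step_cancel (pvInv_foldl (by simp [pvInv]) _) hcan,
    pvDel, List.foldl_append]

-- A's loop computes the (reversed) stack reduction
theorem pvLoopA_eq_stack : ∀ (aux aux2 : List Char) (i : Nat),
    aux2 = aux.map PySem.Chars.upperChar → pvPF aux i →
    pvLoopA aux aux2 i = (List.foldl pvStep [] aux).reverse := by
  intro aux aux2 i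
  fun_induction pvLoopA aux aux2 i with
  | case1 aux aux2 i hlt hcond ih =>
    intro hmap hpf
    have hi1 : i + 1 < aux.length := by omega
    have hi0 : i < aux.length := by omega
    have hmap' : pvDel aux2 i = (pvDel aux i).map PySem.Chars.upperChar := by
      simp [pvDel, hmap, List.map_take, List.map_drop]
    rw [ih hmap' (fun j hj _ => absurd hj (by omega))]
    have hga : aux2.getD i ' ' = PySem.Chars.upperChar (aux[i]'hi0) := by
      rw [hmap, List.getD_eq_getElem _ _ (by simpa using hi0)]
      simp
    have hgb : aux2.getD (i + 1) ' ' = PySem.Chars.upperChar (aux[i + 1]'hi1) := by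
      rw [hmap, List.getD_eq_getElem _ _ (by simpa using hi1)]
      simp
    have hcan : pvCancel (aux[i]'hi0) (aux[i + 1]'hi1) = true := by
      rw [pvCancel, ← hga, ← hgb, ← List.getD_eq_getElem _ ' ' hi0,
        ← List.getD_eq_getElem _ ' ' hi1]
      exact hcond
    rw [← foldl_step_del aux i hi1 hcan]
  | case2 aux aux2 i hlt hcond ih =>
    intro hmap hpf
    apply ih hmap
    intro j hj1 hj2
    rcases Nat.lt_or_ge j i with hlt' | hge
    · exact hpf j (by omega) hj2
    · have hji : j = i := by omega
      subst hji
      have hga : aux2.getD j ' ' = PySem.Chars.upperChar (aux.getD j ' ') := by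
        rw [hmap, List.getD_eq_getElem _ _ (by simp; omega),
          List.getD_eq_getElem _ _ (by omega : j < aux.length)]
        simp
      have hgb : aux2.getD (j + 1) ' ' = PySem.Chars.upperChar (aux.getD (j + 1) ' ') := by
        rw [hmap, List.getD_eq_getElem _ _ (by simp; omega),
          List.getD_eq_getElem _ _ hj2]
        simp
      have hfalse : ((aux2.getD j ' ' == aux2.getD (j + 1) ' ') &&
          !(aux.getD j ' ' == aux.getD (j + 1) ' ')) = false := by
        simpa using hcond
      rw [pvCancel, ← hga, ← hgb]
      exact hfalse
  | case3 aux aux2 i hlt =>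
    intro hmap hpf
    have hred : List.IsChain (fun a b => pvCancel a b = false) aux := by
      rw [List.isChain_iff_getElem]
      intro j hj
      have hv := hpf j (by omega) hj
      rwa [List.getD_eq_getElem _ _ (by omega), List.getD_eq_getElem _ _ hj] at hv
    rw [foldl_step_reduced aux hred [] (by intro t c ht _; simp at ht)]
    simp

-- the A-side string builder is String.ofList
theorem lista_para_string_eq (l : List Char) : lista_para_string l = String.ofList l := by
  apply String.toList_inj.mp
  suffices h : ∀ s : String, (l.foldl (fun acc c => acc.push c) s).toList = s.toList ++ l by
    simpa [lista_para_string] using h ""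
  induction l with
  | nil => simp
  | cons c l ih =>
    intro s
    rw [List.foldl_cons, ih]
    simp

-- ===== VERDICT (by name: the statement is the Claim_ definition above) =====
theorem corrigir_palavra_spec : Claim_equal_corrigir_palavra := by
  intro s _
  unfold Spec_corrigir_palavra corrigir_palavra corrigir_palavra_alt
  rw [lista_para_string_eq,
    pvLoopA_eq_stack s.toList _ 0 (by simp [PySem.Chars.upper])
      (fun j hj _ => absurd hj (by omega))]
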